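-- pv_equiv track=rewrite | github.com/maq1017/VersaTerm | software/tools/render_viewdata_mosaic.py | composite_lines
-- ===== SOURCE A (Python) =====
-- ROW_SPANS = [
--     (0,  7),   # top    block
--     (7,  14),  # middle block
--     (14, 20),  # bottom block
-- ]
--
-- LEFT_CONT = 0xFF
--
-- LEFT_SEP  = 0x7E
--
-- def make_half_glyph(pattern, side, separated=False):
--     """Return list of CHAR_HEIGHT bytes for the LEFT or RIGHT half of pattern."""
--     if side == 'left':
--         on_bits = [bool(pattern & 0x01), bool(pattern & 0x04), bool(pattern & 0x10)]
--     else: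
--         on_bits = [bool(pattern & 0x02), bool(pattern & 0x08), bool(pattern & 0x20)]
--     fill = LEFT_SEP if separated else LEFT_CONT
--     rows = []
--     for row_idx, (rs, re) in enumerate(ROW_SPANS):
--         rows.extend([fill if on_bits[row_idx] else 0] * (re - rs))
--     return rows
--
-- def composite_lines(pattern, separated=False):
--     """Render the full 16-px cell (left half | right half) as ASCII lines."""
--     left  = make_half_glyph(pattern, 'left',  separated)
--     right = make_half_glyph(pattern, 'right', separated)
--     lines = []
--     for lbyte, rbyte in zip(left, right):
--         row = ''
--         for bit in range(7, -1, -1):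
--             row += '█' if (lbyte >> bit) & 1 else '·'
--         for bit in range(7, -1, -1):
--             row += '█' if (rbyte >> bit) & 1 else '·'
--         lines.append(row)
--     return lines
-- ===== SOURCE B (Python) =====
-- BLOCK_ON_CONT = '\u2588' * 8      # '████████'
-- BLOCK_ON_SEP  = '\u00b7' + '\u2588' * 6 + '\u00b7'  # '·██████·'
-- BLOCK_OFF     = '\u00b7' * 8      # '········'
--
-- def composite_lines(pattern, separated=False):
--     """Render the full 16-px cell (left half | right half) as ASCII lines."""
--     on = BLOCK_ON_SEP if separated else BLOCK_ON_CONT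
--     lines = []
--     for i, height in enumerate((7, 7, 6)):
--         left  = on if pattern & (1 << (2 * i)) else BLOCK_OFF
--         right = on if pattern & (2 << (2 * i)) else BLOCK_OFF
--         lines += [left + right] * height
--     return lines
-- ===== Notes on version B (the rewrite author's own statement) =====
-- stated objective: simpler
-- what changed: B drops the intermediate per-row byte lists and the inner MSB-first bit-shift loop: for each of the three row blocks it tests the two pattern bits directly and concatenates two precomputed 8-character half-row strings, replicated to the block height.
import Mathlib
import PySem

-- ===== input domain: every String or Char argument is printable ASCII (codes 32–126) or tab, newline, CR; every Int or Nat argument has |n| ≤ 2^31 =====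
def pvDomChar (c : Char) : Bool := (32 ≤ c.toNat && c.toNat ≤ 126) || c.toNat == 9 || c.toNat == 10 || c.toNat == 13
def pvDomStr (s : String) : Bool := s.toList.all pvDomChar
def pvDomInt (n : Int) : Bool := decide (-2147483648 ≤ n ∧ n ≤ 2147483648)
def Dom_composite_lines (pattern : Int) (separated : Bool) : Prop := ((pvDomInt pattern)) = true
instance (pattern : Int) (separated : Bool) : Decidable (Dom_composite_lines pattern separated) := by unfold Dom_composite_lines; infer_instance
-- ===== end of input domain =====

-- B replaces the per-row byte lists and the per-bit rendering loop by a per-block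
-- lookup of one of three fixed 8-character half-row strings (objective: simpler).

-- ===== PORT A =====
def ROW_SPANS : List (Int × Int) := [(0, 7), (7, 14), (14, 20)]
def LEFT_CONT : Int := 0xFF
def LEFT_SEP : Int := 0x7E

def make_half_glyph (pattern : Int) (side : String) (separated : Bool) : List Int :=
  let on_bits : List Bool :=
    if side == "left" then
      [PySem.Int.band pattern 0x01 != 0, PySem.Int.band pattern 0x04 != 0,
       PySem.Int.band pattern 0x10 != 0]
    else
      [PySem.Int.band pattern 0x02 != 0, PySem.Int.band pattern 0x08 != 0,
       PySem.Int.band pattern 0x20 != 0]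
  let fill : Int := if separated then LEFT_SEP else LEFT_CONT
  (PySem.List.enumerate ROW_SPANS).foldl
    (fun rows p =>
      rows ++ List.replicate (p.2.2 - p.2.1).toNat
        (if PySem.List.pyGetD on_bits p.1 false then fill else 0))
    []

def composite_lines (pattern : Int) (separated : Bool) : List String :=
  let left := make_half_glyph pattern "left" separated
  let right := make_half_glyph pattern "right" separated
  (left.zip right).foldl
    (fun lines p =>
      let row := (PySem.List.pyRange 7 (-1) (-1)).foldl
        (fun r bit => r ++ (if PySem.Int.band (p.1 >>> bit.toNat) 1 != 0 then "█" else "·")) ""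
      let row := (PySem.List.pyRange 7 (-1) (-1)).foldl
        (fun r bit => r ++ (if PySem.Int.band (p.2 >>> bit.toNat) 1 != 0 then "█" else "·")) row
      lines ++ [row])
    []

-- ===== PORT B =====
def BLOCK_ON_CONT : String := "████████"
def BLOCK_ON_SEP : String := "·██████·"
def BLOCK_OFF : String := "········"

def composite_lines_alt (pattern : Int) (separated : Bool) : List String :=
  let on := if separated then BLOCK_ON_SEP else BLOCK_ON_CONT
  (PySem.List.enumerate [(7 : Int), 7, 6]).foldl
    (fun lines p =>
      let left := if PySem.Int.band pattern ((1 : Int) <<< (2 * p.1).toNat) != 0 then on else BLOCK_OFF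
      let right := if PySem.Int.band pattern ((2 : Int) <<< (2 * p.1).toNat) != 0 then on else BLOCK_OFF
      lines ++ List.replicate p.2.toNat (left ++ right))
    []

-- ===== PRECONDITION & SPEC =====
def Spec_composite_lines (pattern : Int) (separated : Bool) (out : List String) : Prop := out = composite_lines_alt pattern separated
instance (pattern : Int) (separated : Bool) (out : List String) : Decidable (Spec_composite_lines pattern separated out) := by unfold Spec_composite_lines; infer_instance

-- ===== CLAIM (what is proved, stated in full; the proofs are below) =====
def Claim_equal_composite_lines : Prop := ∀ (pattern : Int) (separated : Bool), Dom_composite_lines pattern separated → Spec_composite_lines pattern separated (composite_lines pattern separated)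

-- ===== LEMMAS AND PROOFS =====

-- Proof-only helpers: both ports factor through the six mask-test booleans.
def pvHalfA (on_bits : List Bool) (separated : Bool) : List Int :=
  let fill : Int := if separated then LEFT_SEP else LEFT_CONT
  (PySem.List.enumerate ROW_SPANS).foldl
    (fun rows p =>
      rows ++ List.replicate (p.2.2 - p.2.1).toNat
        (if PySem.List.pyGetD on_bits p.1 false then fill else 0))
    []

def pvA (b0 b1 b2 b3 b4 b5 : Bool) (s : Bool) : List String :=
  let left := pvHalfA [b0, b2, b4] s
  let right := pvHalfA [b1, b3, b5] s
  (left.zip right).foldl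
    (fun lines p =>
      let row := (PySem.List.pyRange 7 (-1) (-1)).foldl
        (fun r bit => r ++ (if PySem.Int.band (p.1 >>> bit.toNat) 1 != 0 then "█" else "·")) ""
      let row := (PySem.List.pyRange 7 (-1) (-1)).foldl
        (fun r bit => r ++ (if PySem.Int.band (p.2 >>> bit.toNat) 1 != 0 then "█" else "·")) row
      lines ++ [row])
    []

def pvB (b0 b1 b2 b3 b4 b5 : Bool) (s : Bool) : List String :=
  let on := if s then BLOCK_ON_SEP else BLOCK_ON_CONT
  (([] ++ List.replicate 7 ((if b0 then on else BLOCK_OFF) ++ (if b1 then on else BLOCK_OFF)))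
      ++ List.replicate 7 ((if b2 then on else BLOCK_OFF) ++ (if b3 then on else BLOCK_OFF)))
    ++ List.replicate 6 ((if b4 then on else BLOCK_OFF) ++ (if b5 then on else BLOCK_OFF))

theorem pvA_eq (p : Int) (s : Bool) :
    composite_lines p s =
      pvA (PySem.Int.band p 1 != 0) (PySem.Int.band p 2 != 0) (PySem.Int.band p 4 != 0)
        (PySem.Int.band p 8 != 0) (PySem.Int.band p 16 != 0) (PySem.Int.band p 32 != 0) s := rfl

theorem pvB_eq (p : Int) (s : Bool) :
    composite_lines_alt p s =
      pvB (PySem.Int.band p 1 != 0) (PySem.Int.band p 2 != 0) (PySem.Int.band p 4 != 0)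
        (PySem.Int.band p 8 != 0) (PySem.Int.band p 16 != 0) (PySem.Int.band p 32 != 0) s := rfl

theorem pvA_eq_pvB : ∀ b0 b1 b2 b3 b4 b5 s : Bool, pvA b0 b1 b2 b3 b4 b5 s = pvB b0 b1 b2 b3 b4 b5 s := by
  decide

-- ===== VERDICT (by name: the statement is the Claim_ definition above) =====
theorem composite_lines_spec : Claim_equal_composite_lines := by
  intro p s _
  show composite_lines p s = composite_lines_alt p s
  rw [pvA_eq, pvB_eq, pvA_eq_pvB]
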